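-- pv_equiv track=rewrite | github.com/joplin-vieweb/django-joplin-vieweb | joplin_vieweb/utils.py | placeholder_backslash_doller
-- ===== SOURCE A (Python) =====
-- def placeholder_backslash_doller(md: str) -> str:
--     """Replace every \$ in given md by @@ANTISLASH_DOLLAR_PALCEHOLDER@@.
--     Pay attention to odd \ number: \\$ is not replaced
--       (nor \\\\$, but \\\$ is replaced by \\@@ANTISLASH_DOLLAR_PALCEHOLDER@@)
--
--     Args:
--         md (str): markdown to "escape"
--
--     Returns:
--         str: "escaped" markdown
--     """
--     index = 0
--     antislash_count = 0
--     antislash_dollar_indexes = []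
--     for letter in md:
--         if letter == "$" and antislash_count % 2 == 1:
--             antislash_dollar_indexes.append(index)
--             antislash_count = 0
--         elif letter == "\\":
--             antislash_count = antislash_count + 1
--         else:
--             antislash_count = 0
--         index = index + 1
--
--     escape = ""
--     if not antislash_dollar_indexes:
--         escape = md
--     else:
--         last_index = 0
--         for one_index in antislash_dollar_indexes:
--             escape = escape + md[last_index:one_index - 1]
--             escape = escape + "@@ANTISLASH_DOLLAR_PALCEHOLDER@@"
--             last_index = one_index + 1
--         escape = escape + md[last_index:]
--     return escape
-- ===== SOURCE B (Python) =====
-- def placeholder_backslash_doller(md: str) -> str: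
--     """Single-pass rebuild: buffer a run of backslashes; when a '$' follows an
--     odd-length run, emit run-1 backslashes and the placeholder instead."""
--     out = []
--     run = 0  # pending backslashes not yet emitted
--     for ch in md:
--         if ch == "\\":
--             run += 1
--         else:
--             if ch == "$" and run % 2 == 1:
--                 out.append("\\" * (run - 1))
--                 out.append("@@ANTISLASH_DOLLAR_PALCEHOLDER@@")
--             else:
--                 out.append("\\" * run)
--                 out.append(ch)
--             run = 0
--     out.append("\\" * run)
--     return "".join(out)
-- ===== Notes on version B (the rewrite author's own statement) =====
-- stated objective: simpler
-- what changed: Replaced A's two-pass scheme (collect indexes of escaped dollars, then splice the string by index slicing) with a single left-to-right pass that buffers the current backslash run and emits either the run plus the character or run-1 backslashes plus the placeholder.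
import Mathlib
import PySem

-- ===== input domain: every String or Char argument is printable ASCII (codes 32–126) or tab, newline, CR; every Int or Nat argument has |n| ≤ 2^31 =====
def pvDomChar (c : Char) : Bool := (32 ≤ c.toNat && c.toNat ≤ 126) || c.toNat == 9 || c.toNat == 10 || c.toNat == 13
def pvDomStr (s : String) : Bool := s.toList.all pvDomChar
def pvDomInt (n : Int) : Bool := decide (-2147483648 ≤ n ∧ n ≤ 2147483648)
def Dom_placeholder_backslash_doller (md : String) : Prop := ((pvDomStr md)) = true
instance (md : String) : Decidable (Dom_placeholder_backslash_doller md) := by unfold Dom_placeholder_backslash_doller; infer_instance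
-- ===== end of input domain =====

-- B replaces A's two passes (collect indexes of escaped dollars, then splice
-- slices by index) with one pass buffering the current backslash run: simpler,
-- same O(n) cost.

-- ===== PORT A =====
-- literal port of A: first loop collects indexes of '$' preceded by an odd
-- backslash run; second loop splices md[last:idx-1] + placeholder, then md[last:].
def placeholder_backslash_doller (md : String) : String :=
  let s := md.toList
  let scan := s.foldl (fun (st : Int × Int × List Int) letter =>
      if letter = '$' ∧ PySem.Int.mod st.2.1 2 = 1 then
        (st.1 + 1, 0, st.2.2 ++ [st.1])
      else if letter = '\\' then
        (st.1 + 1, st.2.1 + 1, st.2.2)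
      else
        (st.1 + 1, 0, st.2.2)) (0, 0, [])
  let idxs := scan.2.2
  if idxs = [] then md
  else
    let p := idxs.foldl (fun (st : List Char × Int) one_index =>
        (st.1 ++ PySem.List.slice s (some st.2) (some (one_index - 1))
              ++ "@@ANTISLASH_DOLLAR_PALCEHOLDER@@".toList,
         one_index + 1)) ([], 0)
    String.ofList (p.1 ++ PySem.List.slice s (some p.2) none)

-- ===== PORT B =====
-- literal port of B: one pass with a pending backslash-run counter.
def placeholder_backslash_doller_alt (md : String) : String :=
  let p := md.toList.foldl (fun (st : List Char × Int) ch =>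
      if ch = '\\' then (st.1, st.2 + 1)
      else if ch = '$' ∧ PySem.Int.mod st.2 2 = 1 then
        (st.1 ++ List.replicate (st.2 - 1).toNat '\\'
              ++ "@@ANTISLASH_DOLLAR_PALCEHOLDER@@".toList, 0)
      else
        (st.1 ++ List.replicate st.2.toNat '\\' ++ [ch], 0)) ([], 0)
  String.ofList (p.1 ++ List.replicate p.2.toNat '\\')

-- ===== PRECONDITION & SPEC =====
def Spec_placeholder_backslash_doller (md : String) (out : String) : Prop := out = placeholder_backslash_doller_alt md
instance (md : String) (out : String) : Decidable (Spec_placeholder_backslash_doller md out) := by unfold Spec_placeholder_backslash_doller; infer_instance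

-- ===== CLAIM (what is proved, stated in full; the proofs are below) =====
def Claim_equal_placeholder_backslash_doller : Prop := ∀ (md : String), Dom_placeholder_backslash_doller md → Spec_placeholder_backslash_doller md (placeholder_backslash_doller md)

-- ===== LEMMAS AND PROOFS =====

def pvPH : List Char := "@@ANTISLASH_DOLLAR_PALCEHOLDER@@".toList

-- recursive form of A's scanning loop
def pvScan : List Char → Int → Int → List Int
  | [], _, _ => []
  | ch :: t, i, c =>
    if ch = '$' ∧ PySem.Int.mod c 2 = 1 then i :: pvScan t (i + 1) 0
    else if ch = '\\' then pvScan t (i + 1) (c + 1)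
    else pvScan t (i + 1) 0

-- recursive form of A's splicing loop (including the trailing md[last:])
def pvSplice (s : List Char) : List Int → Int → List Char
  | [], last => PySem.List.slice s (some last) none
  | j :: rest, last =>
      PySem.List.slice s (some last) (some (j - 1)) ++ pvPH ++ pvSplice s rest (j + 1)

-- recursive form of B's loop
def pvB : List Char → Int → List Char
  | [], run => List.replicate run.toNat '\\'
  | ch :: t, run =>
    if ch = '\\' then pvB t (run + 1)
    else if ch = '$' ∧ PySem.Int.mod run 2 = 1 then
      List.replicate (run - 1).toNat '\\' ++ pvPH ++ pvB t 0
    else List.replicate run.toNat '\\' ++ [ch] ++ pvB t 0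

lemma pvScan_foldl (l : List Char) :
    ∀ (i c : Int) (acc : List Int),
      (l.foldl (fun (st : Int × Int × List Int) letter =>
        if letter = '$' ∧ PySem.Int.mod st.2.1 2 = 1 then
          (st.1 + 1, 0, st.2.2 ++ [st.1])
        else if letter = '\\' then
          (st.1 + 1, st.2.1 + 1, st.2.2)
        else
          (st.1 + 1, 0, st.2.2)) (i, c, acc)).2.2 = acc ++ pvScan l i c := by
  induction l with
  | nil => intro i c acc; simp [pvScan]
  | cons ch t ih =>
    intro i c acc
    simp only [List.foldl_cons, pvScan]
    by_cases h1 : ch = '$' ∧ PySem.Int.mod c 2 = 1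
    · rw [if_pos h1, if_pos h1, ih]
      simp
    · rw [if_neg h1, if_neg h1]
      by_cases h2 : ch = '\\'
      · rw [if_pos h2, if_pos h2, ih]
      · rw [if_neg h2, if_neg h2, ih]

lemma pvSplice_foldl (s : List Char) (idxs : List Int) :
    ∀ (esc : List Char) (last : Int),
      (idxs.foldl (fun (st : List Char × Int) one_index =>
        (st.1 ++ PySem.List.slice s (some st.2) (some (one_index - 1))
              ++ "@@ANTISLASH_DOLLAR_PALCEHOLDER@@".toList,
         one_index + 1)) (esc, last)).1
      ++ PySem.List.slice s (some (idxs.foldl (fun (st : List Char × Int) one_index =>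
        (st.1 ++ PySem.List.slice s (some st.2) (some (one_index - 1))
              ++ "@@ANTISLASH_DOLLAR_PALCEHOLDER@@".toList,
         one_index + 1)) (esc, last)).2) none
      = esc ++ pvSplice s idxs last := by
  induction idxs with
  | nil => intro esc last; simp [pvSplice]
  | cons j rest ih =>
    intro esc last
    simp only [List.foldl_cons, pvSplice]
    rw [ih]
    simp [pvPH]

lemma pvB_foldl (l : List Char) :
    ∀ (out : List Char) (run : Int),
      (l.foldl (fun (st : List Char × Int) ch =>
        if ch = '\\' then (st.1, st.2 + 1)
        else if ch = '$' ∧ PySem.Int.mod st.2 2 = 1 then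
          (st.1 ++ List.replicate (st.2 - 1).toNat '\\'
                ++ "@@ANTISLASH_DOLLAR_PALCEHOLDER@@".toList, 0)
        else
          (st.1 ++ List.replicate st.2.toNat '\\' ++ [ch], 0)) (out, run)).1
      ++ List.replicate ((l.foldl (fun (st : List Char × Int) ch =>
        if ch = '\\' then (st.1, st.2 + 1)
        else if ch = '$' ∧ PySem.Int.mod st.2 2 = 1 then
          (st.1 ++ List.replicate (st.2 - 1).toNat '\\'
                ++ "@@ANTISLASH_DOLLAR_PALCEHOLDER@@".toList, 0)
        else
          (st.1 ++ List.replicate st.2.toNat '\\' ++ [ch], 0)) (out, run)).2).toNat '\\'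
      = out ++ pvB l run := by
  induction l with
  | nil => intro out run; simp [pvB]
  | cons ch t ih =>
    intro out run
    simp only [List.foldl_cons, pvB]
    by_cases h1 : ch = '\\'
    · rw [if_pos h1, if_pos h1, ih]
    · rw [if_neg h1, if_neg h1]
      by_cases h2 : ch = '$' ∧ PySem.Int.mod run 2 = 1
      · rw [if_pos h2, if_pos h2, ih]
        simp [pvPH]
      · rw [if_neg h2, if_neg h2, ih]
        simp

lemma pvMod_cast (c : Nat) : PySem.Int.mod (c : Int) 2 = 1 ↔ c % 2 = 1 := by
  rw [PySem.Int.mod_eq_emod_of_pos (by omega)]; omega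

-- the heart of the proof: A's splice of the scanned indexes equals B's output,
-- for a string decomposed as processed prefix fr, pending output pre, the
-- current backslash run, and the remaining input t.
lemma pvMain (t : List Char) :
    ∀ (c : Nat) (pre fr : List Char) (i : Int),
      i = fr.length + pre.length + c →
      pvSplice (fr ++ pre ++ List.replicate c '\\' ++ t) (pvScan t i (c : Int)) (fr.length)
        = pre ++ pvB t (c : Int) := by
  induction t with
  | nil =>
    intro c pre fr i hi
    simp only [pvScan, pvSplice, pvB]
    rw [PySem.List.slice_from_natCast]
    simp
  | cons ch t ih =>
    intro c pre fr i hi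
    by_cases hd : ch = '$' ∧ PySem.Int.mod (c : Int) 2 = 1
    · -- escaped dollar: emit pre ++ replicate (c-1) ++ placeholder, restart
      have hc1 : c % 2 = 1 := (pvMod_cast c).mp hd.2
      have hne : ¬ ch = '\\' := by rw [hd.1]; decide
      simp only [pvScan, pvB]
      rw [if_pos hd, if_neg hne, if_pos hd]
      simp only [pvSplice]
      have hsl : PySem.List.slice (fr ++ pre ++ List.replicate c '\\' ++ ch :: t)
          (some (fr.length : Int)) (some (i - 1))
          = pre ++ List.replicate (c - 1) '\\' := by
        have hi1 : i - 1 = ((fr.length + (pre.length + (c - 1)) : Nat) : Int) := by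
          push_cast; omega
        rw [hi1, PySem.List.slice_natCast]
        have hdrop : (fr ++ pre ++ List.replicate c '\\' ++ ch :: t).drop fr.length
            = pre ++ List.replicate c '\\' ++ ch :: t := by
          simp [List.append_assoc]
        rw [hdrop]
        have hlen : fr.length + (pre.length + (c - 1)) - fr.length = pre.length + (c - 1) := by omega
        rw [hlen]
        rw [List.append_assoc, List.take_append]
        congr 1
        · exact List.take_of_length_le (by omega)
        · rw [show pre.length + (c - 1) - pre.length = c - 1 by omega]
          rw [List.take_append_of_le_length (by simp), List.take_replicate]
          congr 1; omega
      rw [hsl]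
      -- the tail: apply the IH with everything consumed into fr
      have ih' := ih 0 [] (fr ++ pre ++ List.replicate c '\\' ++ [ch]) (i + 1)
        (by simp; omega)
      simp only [List.append_nil, List.replicate_zero, Nat.cast_zero] at ih'
      rw [show (((fr ++ pre ++ List.replicate c '\\' ++ [ch]).length : Nat) : Int) = i + 1 by
            simp; push_cast; omega] at ih'
      rw [show fr ++ pre ++ List.replicate c '\\' ++ [ch] ++ t
            = fr ++ pre ++ List.replicate c '\\' ++ ch :: t by simp] at ih'
      rw [ih']
      rw [show ((c : Int) - 1).toNat = c - 1 by omega]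
      simp
    · by_cases hb : ch = '\\'
      · -- a backslash: extend the run
        have hdd : ¬ (ch = '$' ∧ PySem.Int.mod (c : Int) 2 = 1) := hd
        simp only [pvScan, pvB]
        rw [if_neg hdd, if_pos hb, if_pos hb]
        have ih' := ih (c + 1) pre fr (i + 1) (by push_cast; omega)
        have hrep : fr ++ pre ++ List.replicate c '\\' ++ ch :: t
            = fr ++ pre ++ List.replicate (c + 1) '\\' ++ t := by
          rw [hb]; simp [List.replicate_succ']
        rw [hrep]
        rw [show ((c : Int) + 1) = ((c + 1 : Nat) : Int) by push_cast; ring]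
        exact ih'
      · -- ordinary character: flush the run and the character into pre
        simp only [pvScan, pvB]
        rw [if_neg hd, if_neg hb, if_neg hb, if_neg hd]
        have ih' := ih 0 (pre ++ List.replicate c '\\' ++ [ch]) fr (i + 1)
          (by simp; omega)
        simp only [List.replicate_zero, List.append_nil, Nat.cast_zero] at ih'
        rw [show fr ++ (pre ++ List.replicate c '\\' ++ [ch]) ++ t
              = fr ++ pre ++ List.replicate c '\\' ++ ch :: t by simp] at ih'
        rw [ih']
        simp

lemma pvA_eq (md : String) :
    placeholder_backslash_doller md
      = String.ofList (pvSplice md.toList (pvScan md.toList 0 0) 0) := by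
  simp only [placeholder_backslash_doller]
  rw [pvScan_foldl md.toList 0 0 []]
  simp only [List.nil_append]
  by_cases hnil : pvScan md.toList 0 0 = []
  · rw [if_pos hnil, hnil]
    simp [pvSplice, PySem.List.slice_none_none]
  · rw [if_neg hnil]
    rw [pvSplice_foldl md.toList (pvScan md.toList 0 0) [] 0]
    simp

lemma pvB_eq (md : String) :
    placeholder_backslash_doller_alt md = String.ofList (pvB md.toList 0) := by
  simp only [placeholder_backslash_doller_alt]
  rw [pvB_foldl md.toList [] 0]
  simp

-- ===== VERDICT (by name: the statement is the Claim_ definition above) =====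
theorem placeholder_backslash_doller_spec : Claim_equal_placeholder_backslash_doller := by
  intro md _
  unfold Spec_placeholder_backslash_doller
  rw [pvA_eq, pvB_eq]
  have h := pvMain md.toList 0 [] [] 0 (by simp)
  simp only [List.nil_append, List.replicate_zero, Nat.cast_zero, List.length_nil] at h
  rw [h]
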